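-- pv_equiv track=rewrite | github.com/MPRlab/PitchSensing2025 | song_diagram.py | split_max
-- ===== SOURCE A (Python) =====
-- import math
--
-- def split_arr(a, ln):
--     #Ищем количество маленьких массивов
--     split_a = [[] for i in range(math.ceil(len(a) / ln))]
--     c = 0
--     for i in a:
--         split_a[c//ln].append(i)
--         c += 1
--     return split_a
--
-- def split_max(a, ln):
--     split_a = split_arr(a, ln)
--     split_max_arr = []
--     for i in split_a:
--         maxi = max(i)
--         for j in range(ln):
--             if len(split_max_arr) < len(a):
--                 split_max_arr.append(maxi)
--     return split_max_arr
-- ===== SOURCE B (Python) =====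
-- def split_max(a, ln):
--     out = []
--     for i in range(0, len(a), ln):
--         chunk = a[i:i + ln]
--         out += [max(chunk)] * len(chunk)
--     return out
-- ===== Notes on version B (the rewrite author's own statement) =====
-- stated objective: simpler
-- what changed: B drops split_arr's bucket list built by a counter/index fold and the capped inner repeat loop; it walks chunk starts with range(0, len(a), ln), slices each chunk and extends the output with the chunk's max repeated len(chunk) times, in one pass with no intermediate list of lists.
import Mathlib
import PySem

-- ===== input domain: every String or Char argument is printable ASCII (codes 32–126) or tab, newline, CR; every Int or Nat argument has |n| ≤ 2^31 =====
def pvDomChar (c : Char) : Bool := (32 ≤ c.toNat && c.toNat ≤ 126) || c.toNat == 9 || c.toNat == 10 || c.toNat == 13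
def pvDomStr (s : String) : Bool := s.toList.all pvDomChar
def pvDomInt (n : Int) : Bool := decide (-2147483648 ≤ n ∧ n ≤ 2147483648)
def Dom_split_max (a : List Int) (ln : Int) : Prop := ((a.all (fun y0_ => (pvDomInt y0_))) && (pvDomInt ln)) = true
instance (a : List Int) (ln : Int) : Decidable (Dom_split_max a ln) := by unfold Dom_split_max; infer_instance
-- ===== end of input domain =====

-- B replaces A's bucket list (split_arr) and capped repeat loop by a single pass over
-- chunk starts, slicing each chunk and repeating its max len(chunk) times (simpler).

-- ===== PORT A =====
-- math.ceil(len(a)/ln): float division is exact enough on Dom (|values| ≤ 2^31 < 2^53)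
-- for the ceiling to equal the integer ceiling -((-len)//ln), ported as such.
def split_max (a : List Int) (ln : Int) : List Int :=
  let k : Int := -PySem.Int.floordiv (-(a.length : Int)) ln
  let split_a : List (List Int) :=
    (a.foldl
      (fun (s : List (List Int) × Int) i =>
        (PySem.List.pySetD s.1 (PySem.Int.floordiv s.2 ln)
          (PySem.List.pyGetD s.1 (PySem.Int.floordiv s.2 ln) [] ++ [i]),
         s.2 + 1))
      (List.replicate k.toNat [], 0)).1
  split_a.foldl
    (fun out i =>
      let maxi := (PySem.List.max? i (fun y => y)).getD 0
      (PySem.List.pyRange 0 ln 1).foldl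
        (fun out _ => if out.length < a.length then out ++ [maxi] else out) out)
    []

-- ===== PORT B =====
def split_max_alt (a : List Int) (ln : Int) : List Int :=
  (PySem.List.pyRange 0 (a.length : Int) ln).foldl
    (fun out i =>
      let chunk := PySem.List.slice a (some i) (some (i + ln))
      out ++ List.replicate chunk.length ((PySem.List.max? chunk (fun y => y)).getD 0))
    []

-- ===== PRECONDITION & SPEC =====
-- Pre_ excludes exactly the inputs where A raises: ln = 0 (ZeroDivisionError in math.ceil)
-- and ln < 0 with a non-empty (ceil gives 0 buckets, then IndexError on split_a[0]).
def Pre_split_max (a : List Int) (ln : Int) : Prop := 0 < ln ∨ (a = [] ∧ ln ≠ 0)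
instance (a : List Int) (ln : Int) : Decidable (Pre_split_max a ln) := by unfold Pre_split_max; infer_instance
def pvWitness_split_max : List Int × Int := ([1, 2, 3], 2)

def Spec_split_max (a : List Int) (ln : Int) (out : List Int) : Prop := out = split_max_alt a ln
instance (a : List Int) (ln : Int) (out : List Int) : Decidable (Spec_split_max a ln out) := by unfold Spec_split_max; infer_instance

-- ===== CLAIM (what is proved, stated in full; the proofs are below) =====
def Claim_equal_split_max : Prop := ∀ (a : List Int) (ln : Int), Dom_split_max a ln → Pre_split_max a ln → Spec_split_max a ln (split_max a ln)

-- ===== LEMMAS AND PROOFS =====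

def chunksI (lnN : Nat) (xs : List Int) : List (List Int) :=
  if h : xs = [] ∨ lnN = 0 then [] else
    xs.take lnN :: chunksI lnN (xs.drop lnN)
termination_by xs.length
decreasing_by
  push Not at h
  have hx : 0 < xs.length := List.length_pos_iff.mpr h.1
  simp [List.length_drop]; omega

lemma chunksI_nil (lnN : Nat) : chunksI lnN [] = [] := by rw [chunksI]; simp

lemma chunksI_cons {lnN : Nat} {xs : List Int} (hx : xs ≠ []) (hl : lnN ≠ 0) :
    chunksI lnN xs = xs.take lnN :: chunksI lnN (xs.drop lnN) := by
  rw [chunksI]; simp [hx, hl]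

lemma setApp (done rest : List (List Int)) (cur v : List Int) :
    (done ++ cur :: rest).set done.length v = done ++ v :: rest := by
  induction done with
  | nil => simp
  | cons d t ih => simp [List.set_cons_succ, ih]

lemma getDApp (done rest : List (List Int)) (cur : List Int) :
    (done ++ cur :: rest).getD done.length [] = cur := by
  induction done with
  | nil => simp
  | cons d t ih => simpa using ih

lemma Amain (ln : Int) (hln : 0 < ln) :
    ∀ (xs : List Int) (done : List (List Int)) (cur : List Int) (m : Nat),
      cur.length < ln.toNat →
      0 < cur.length + xs.length →
      m * ln.toNat < cur.length + xs.length →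
      cur.length + xs.length ≤ (m + 1) * ln.toNat →
      (xs.foldl
        (fun (s : List (List Int) × Int) i =>
          (PySem.List.pySetD s.1 (PySem.Int.floordiv s.2 ln)
            (PySem.List.pyGetD s.1 (PySem.Int.floordiv s.2 ln) [] ++ [i]),
           s.2 + 1))
        (done ++ cur :: List.replicate m [], ln * done.length + cur.length)).1
      = done ++ chunksI ln.toNat (cur ++ xs) := by
  intro xs
  induction xs with
  | nil =>
    intro done cur m hcur hpos hm1 hm2
    simp only [List.foldl_nil, List.append_nil]
    have hcne : cur ≠ [] := by
      intro hc; subst hc; simp at hpos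
    have hm0 : m = 0 := by
      by_contra hm
      have h1 : 1 * ln.toNat ≤ m * ln.toNat := Nat.mul_le_mul_right _ (by omega)
      rw [one_mul] at h1
      simp at hm1
      omega
    subst hm0
    rw [chunksI_cons hcne (by omega)]
    rw [List.drop_eq_nil_of_le (by omega), chunksI_nil]
    rw [List.take_of_length_le (by omega)]
    simp
  | cons x rest ih =>
    intro done cur m hcur hpos hm1 hm2
    have hlnN : 0 < ln.toNat := by omega
    have hcl : (cur.length : Int) < ln := by omega
    simp only [List.foldl_cons]
    have hidx : PySem.Int.floordiv (ln * (done.length : Int) + (cur.length : Int)) ln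
        = (done.length : Int) := by
      rw [PySem.Int.floordiv_eq_iff_of_pos hln]
      constructor
      · have : (done.length : Int) * ln = ln * done.length := mul_comm _ _
        have h0 : (0 : Int) ≤ cur.length := by positivity
        linarith
      · have : ((done.length : Int) + 1) * ln = ln * done.length + ln := by ring
        linarith
    rw [hidx, PySem.List.pyGetD_natCast, PySem.List.pySetD_natCast, getDApp, setApp]
    by_cases hfull : cur.length + 1 < ln.toNat
    · have hc2 : ln * (done.length : Int) + (cur.length : Int) + 1
          = ln * (done.length : Int) + ((cur ++ [x]).length : Int) := by
        simp only [List.length_append, List.length_cons, List.length_nil]; push_cast; ring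
      rw [hc2]
      have := ih done (cur ++ [x]) m (by simp; omega)
        (by simp)
        (by simp only [List.length_append, List.length_cons, List.length_nil] at hm1 ⊢; linarith [hm1])
        (by simp only [List.length_append, List.length_cons, List.length_nil] at hm2 ⊢; linarith [hm2])
      rw [this]
      congr 2
      simp
    · have hfe : cur.length + 1 = ln.toNat := by omega
      by_cases hrest : rest = []
      · subst hrest
        simp only [List.foldl_nil]
        have hm0 : m = 0 := by
          by_contra hm
          have h1 : 1 * ln.toNat ≤ m * ln.toNat := Nat.mul_le_mul_right _ (by omega)
          rw [one_mul] at h1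
          simp at hm1
          omega
        subst hm0
        have hne : cur ++ [x] ≠ [] := by simp
        rw [chunksI_cons (by simpa using hne) (by omega)]
        rw [show cur ++ [x] = cur ++ x :: ([]:List Int) by simp] 
        rw [List.drop_eq_nil_of_le (by simp; omega), chunksI_nil]
        rw [List.take_of_length_le (by simp; omega)]
        simp
      · have hm1' : 1 ≤ m := by
          by_contra hm
          have hm0 : m = 0 := by omega
          subst hm0
          have : 0 < rest.length := List.length_pos_iff.mpr hrest
          simp at hm2
          omega
        have hd : m * ln.toNat = (m - 1) * ln.toNat + ln.toNat := by
          calc m * ln.toNat = ((m - 1) + 1) * ln.toNat := by rw [Nat.sub_add_cancel hm1']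
            _ = (m - 1) * ln.toNat + ln.toNat := by ring
        have hrep : List.replicate m ([] : List Int)
            = ([] : List Int) :: List.replicate (m - 1) [] := by
          conv_lhs => rw [show m = (m - 1) + 1 by omega]
          rw [List.replicate_succ]
        rw [hrep]
        have hregroup : done ++ (cur ++ [x]) :: ([] : List Int) :: List.replicate (m-1) []
            = (done ++ [cur ++ [x]]) ++ ([] : List Int) :: List.replicate (m-1) [] := by
          simp
        rw [hregroup]
        have hcount : ln * (done.length : Int) + (cur.length : Int) + 1
            = ln * ((done ++ [cur ++ [x]]).length : Int) + (([] : List Int).length : Int) := by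
          have h1 : (cur.length : Int) + 1 = ln := by omega
          simp only [List.length_append, List.length_cons, List.length_nil]
          push_cast
          linarith [h1]
        rw [hcount]
        have hexp : (m + 1) * ln.toNat = m * ln.toNat + ln.toNat := by ring
        have := ih (done ++ [cur ++ [x]]) [] (m - 1) (by simpa using hlnN)
          (by simp only [List.length_nil, Nat.zero_add]; exact List.length_pos_iff.mpr hrest)
          (by simp only [List.length_nil, List.length_cons, Nat.zero_add]
              simp only [List.length_cons] at hm1
              linarith [hm1, hd])
          (by simp only [List.length_nil, List.length_cons, Nat.zero_add]
              simp only [List.length_cons] at hm2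
              have hd2 : (m - 1 + 1) * ln.toNat = m * ln.toNat := by
                rw [Nat.sub_add_cancel hm1']
              linarith [hm2, hd2, hexp, hfe])
        rw [this]
        rw [List.append_assoc]
        congr 1
        rw [List.nil_append]
        rw [chunksI_cons (xs := cur ++ x :: rest) (by simp) (by omega)]
        rw [show cur ++ x :: rest = (cur ++ [x]) ++ rest from (List.append_assoc cur [x] rest).symm]
        rw [List.take_left' (by simp only [List.length_append, List.length_cons, List.length_nil]; omega),
            List.drop_left' (by simp only [List.length_append, List.length_cons, List.length_nil]; omega)]
        simp

def pvFlat (lnN : Nat) (xs : List Int) : List Int :=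
  (chunksI lnN xs).flatMap
    (fun ch => List.replicate ch.length ((PySem.List.max? ch (fun y => y)).getD 0))

lemma innerL (n : Nat) (m : Int) :
    ∀ (l : List Int) (out : List Int), out.length ≤ n →
      l.foldl (fun out _ => if out.length < n then out ++ [m] else out) out
        = out ++ List.replicate (min l.length (n - out.length)) m := by
  intro l
  induction l with
  | nil => intro out h; simp
  | cons x t ih =>
    intro out h
    by_cases hlt : out.length < n
    · simp only [List.foldl_cons, if_pos hlt]
      rw [ih (out ++ [m]) (by simp; omega)]
      rw [List.append_assoc]
      congr 1
      show m :: List.replicate (min t.length (n - (out ++ [m]).length)) m = _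
      rw [← List.replicate_succ]
      congr 1
      simp
      omega
    · have he : out.length = n := by omega
      simp only [List.foldl_cons, if_neg hlt]
      rw [ih out h]
      simp [he]

lemma outerA (ln : Int) (hln : 0 < ln) (n : Nat) :
    ∀ (fuel : Nat) (xs out : List Int), xs.length ≤ fuel → out.length + xs.length = n →
      (chunksI ln.toNat xs).foldl
        (fun out i =>
          let maxi := (PySem.List.max? i (fun y => y)).getD 0
          (PySem.List.pyRange 0 ln 1).foldl
            (fun out _ => if out.length < n then out ++ [maxi] else out) out)
        out
      = out ++ pvFlat ln.toNat xs := by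
  intro fuel
  induction fuel with
  | zero =>
    intro xs out hf hn
    have hxs : xs = [] := by
      cases xs with
      | nil => rfl
      | cons a t => simp at hf
    subst hxs
    simp [chunksI_nil, pvFlat]
  | succ fuel ih =>
    intro xs out hf hn
    by_cases hxs : xs = []
    · subst hxs; simp [chunksI_nil, pvFlat]
    · have hlnN : 0 < ln.toNat := by omega
      have hxl : 0 < xs.length := List.length_pos_iff.mpr hxs
      rw [chunksI_cons hxs (by omega)]
      simp only [List.foldl_cons]
      rw [innerL n _ _ out (by omega)]
      have hlen : (PySem.List.pyRange 0 ln 1).length = ln.toNat := by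
        have := PySem.List.length_pyRange_one 0 ln
        simpa using this
      rw [hlen]
      have hmin : min ln.toNat (n - out.length) = (xs.take ln.toNat).length := by
        rw [List.length_take]
        omega
      rw [hmin]
      rw [ih (xs.drop ln.toNat) _ (by rw [List.length_drop]; omega)
        (by rw [List.length_append, List.length_replicate, List.length_take, List.length_drop]; omega)]
      rw [List.append_assoc]
      congr 1
      conv_rhs => rw [pvFlat, chunksI_cons hxs (by omega : ln.toNat ≠ 0), List.flatMap_cons]
      rfl

lemma pyRange_pos_cons {i n ln : Int} (hln : 0 < ln) (h : i < n) :
    PySem.List.pyRange i n ln = i :: PySem.List.pyRange (i + ln) n ln := by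
  rw [PySem.List.pyRange_of_pos _ _ hln, PySem.List.pyRange_of_pos _ _ hln, if_pos h]
  by_cases h2 : i + ln < n
  · rw [if_pos h2]
    set q' : Int := (n - (i + ln) + ln - 1) / ln with hq'
    have hfd : PySem.Int.floordiv (n - (i + ln) + ln - 1) ln = q' :=
      PySem.Int.floordiv_eq_ediv_of_pos hln
    have hbr := (PySem.Int.floordiv_eq_iff_of_pos hln).mp hfd
    have d1 : (q' + 1) * ln = q' * ln + ln := by ring
    have hkey : (n - i + ln - 1) / ln = q' + 1 := by
      rw [← PySem.Int.floordiv_eq_ediv_of_pos hln]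
      rw [PySem.Int.floordiv_eq_iff_of_pos hln]
      constructor
      · rw [d1]; linarith [hbr.1]
      · have : (q' + 1 + 1) * ln = q' * ln + ln + ln := by ring
        rw [this]; linarith [hbr.2, d1]
    have hq'nn : 0 ≤ q' := by
      by_contra hneg
      push Not at hneg
      have : (q' + 1) * ln ≤ 0 * ln := by
        apply mul_le_mul_of_nonneg_right _ (le_of_lt hln)
        omega
      rw [d1] at this
      simp at this
      linarith [hbr.2]
    rw [hkey]
    have : ((q' + 1 : Int)).toNat = q'.toNat + 1 := by omega
    rw [this, List.range_succ_eq_map]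
    simp only [List.map_cons, List.map_map]
    congr 1
    · simp
    · apply List.map_congr_left
      intro k _
      simp [Function.comp, Nat.succ_eq_add_one]
      ring
  · rw [if_neg h2]
    have hone : (n - i + ln - 1) / ln = 1 := by
      rw [← PySem.Int.floordiv_eq_ediv_of_pos hln]
      rw [PySem.Int.floordiv_eq_iff_of_pos hln]
      constructor
      · linarith
      · have : (1 + 1 : Int) * ln = ln + ln := by ring
        rw [this]; omega
    rw [hone]
    simp

lemma Bmain (a : List Int) (ln : Int) (hln : 0 < ln) :
    ∀ (fuel : Nat) (xs out : List Int) (i : Int), xs.length ≤ fuel → 0 ≤ i →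
      xs = a.drop i.toNat →
      (PySem.List.pyRange i (a.length : Int) ln).foldl
        (fun out i =>
          let chunk := PySem.List.slice a (some i) (some (i + ln))
          out ++ List.replicate chunk.length ((PySem.List.max? chunk (fun y => y)).getD 0))
        out
      = out ++ pvFlat ln.toNat xs := by
  intro fuel
  induction fuel with
  | zero =>
    intro xs out i hf hi hxs
    have hxs0 : xs = [] := by
      cases xs with
      | nil => rfl
      | cons a t => simp at hf
    subst hxs0
    have hge : (a.length : Int) ≤ i := by
      have := congrArg List.length hxs
      simp [List.length_drop] at this
      omega
    rw [PySem.List.pyRange_of_pos _ _ hln, if_neg (by omega)]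
    simp [chunksI_nil, pvFlat]
  | succ fuel ih =>
    intro xs out i hf hi hxs
    by_cases hlt : i < (a.length : Int)
    · have hlnN : 0 < ln.toNat := by omega
      have hxne : xs ≠ [] := by
        subst hxs
        simp only [ne_eq, List.drop_eq_nil_iff]
        omega
      rw [pyRange_pos_cons hln hlt]
      simp only [List.foldl_cons]
      have hchunk : PySem.List.slice a (some i) (some (i + ln)) = xs.take ln.toNat := by
        rw [PySem.List.slice_toNat a hi (by omega), hxs]
        congr 1
        omega
      rw [hchunk]
      rw [ih (xs.drop ln.toNat) _ (i + ln)
        (by rw [List.length_drop]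
            have : 0 < xs.length := List.length_pos_iff.mpr hxne
            omega)
        (by omega)
        (by rw [hxs, List.drop_drop]
            congr 1
            omega)]
      rw [List.append_assoc]
      congr 1
      conv_rhs => rw [pvFlat, chunksI_cons hxne (by omega : ln.toNat ≠ 0), List.flatMap_cons]
      rfl
    · have hxs0 : xs = [] := by
        rw [hxs]
        simp only [List.drop_eq_nil_iff]
        omega
      subst hxs0
      rw [PySem.List.pyRange_of_pos _ _ hln, if_neg hlt]
      simp [chunksI_nil, pvFlat]


lemma foldl_cap_nil (m : Int) (l : List Int) :
    l.foldl (fun (out : List Int) _ =>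
      if out.length < ([] : List Int).length then out ++ [m] else out) [] = [] := by
  induction l with
  | nil => rfl
  | cons x t ih => simpa using ih

lemma outer_empty (ln : Int) (bs : List (List Int)) :
    bs.foldl (fun (out : List Int) i =>
      let maxi := (PySem.List.max? i (fun y => y)).getD 0
      (PySem.List.pyRange 0 ln 1).foldl
        (fun out _ => if out.length < ([] : List Int).length then out ++ [maxi] else out) out) [] = [] := by
  induction bs with
  | nil => rfl
  | cons b t ih =>
    simp only [List.foldl_cons]
    rw [foldl_cap_nil]
    exact ih

lemma split_max_empty (ln : Int) : split_max [] ln = [] := by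
  unfold split_max
  dsimp only
  rw [List.foldl_nil]
  exact outer_empty ln _

lemma split_max_alt_empty (ln : Int) : split_max_alt [] ln = [] := by
  simp [split_max_alt, PySem.List.pyRange]

lemma split_max_eq_pvFlat (a : List Int) (ln : Int) (hln : 0 < ln) (ha : a ≠ []) :
    split_max a ln = pvFlat ln.toNat a := by
  have hlen : 0 < a.length := List.length_pos_iff.mpr ha
  have hlnN : 0 < ln.toNat := by omega
  have hlnc : ((ln.toNat : Nat) : Int) = ln := by omega
  set k : Int := -PySem.Int.floordiv (-(a.length : Int)) ln with hk_def
  have hbr : (k - 1) * ln < (a.length : Int) ∧ (a.length : Int) ≤ k * ln :=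
    (PySem.Int.neg_floordiv_neg_eq_iff_of_pos hln).mp hk_def.symm
  have hk1 : 1 ≤ k := by nlinarith [hbr.1, hbr.2]
  set K : Nat := k.toNat with hK_def
  have hK : ((K : Nat) : Int) = k := Int.toNat_of_nonneg (by omega)
  have hK1 : 1 ≤ K := by omega
  have c1 : (K - 1) * ln.toNat < a.length := by
    zify [hK1]
    rw [hK, hlnc]
    exact hbr.1
  have c2 : a.length ≤ (K - 1 + 1) * ln.toNat := by
    have he : K - 1 + 1 = K := by omega
    rw [he]
    zify
    rw [hK, hlnc]
    exact hbr.2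
  have hA := Amain ln hln a [] [] (K - 1) (by simpa using hlnN) (by simpa using hlen)
    (by simpa using c1) (by simpa using c2)
  simp only [List.nil_append, List.length_nil, Nat.cast_zero, mul_zero, add_zero] at hA
  have hrep : List.replicate K ([] : List Int) = ([] : List Int) :: List.replicate (K - 1) [] := by
    conv_lhs => rw [show K = (K - 1) + 1 by omega]
    rw [List.replicate_succ]
  have hO := outerA ln hln a.length a.length a [] le_rfl (by simp)
  unfold split_max
  dsimp only
  rw [← hK_def, hrep, hA, hO]
  simp

lemma split_max_alt_eq_pvFlat (a : List Int) (ln : Int) (hln : 0 < ln) :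
    split_max_alt a ln = pvFlat ln.toNat a := by
  have h := Bmain a ln hln a.length a [] 0 le_rfl le_rfl (by simp)
  simpa [split_max_alt] using h

-- ===== VERDICT (by name: the statement is the Claim_ definition above) =====
theorem split_max_spec : Claim_equal_split_max := by
  intro a ln _ hpre
  unfold Spec_split_max
  by_cases ha : a = []
  · subst ha; rw [split_max_empty, split_max_alt_empty]
  · have hln : 0 < ln := by
      rcases hpre with h | ⟨h, _⟩
      · exact h
      · exact absurd h ha
    rw [split_max_eq_pvFlat a ln hln ha, split_max_alt_eq_pvFlat a ln hln]
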